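-- pv_equiv track=rewrite | github.com/su-memory/su-memory-sdk | src/su_memory/_sys/_energy_relations.py | get_cycle_sequence
-- ===== SOURCE A (Python) =====
-- from typing import Dict, List, Optional, Tuple, Any
--
-- ENERGY_ENHANCE: Dict[str, str] = {
--     "wood": "fire",      # 木生火
--     "fire": "earth",     # 火生土
--     "earth": "metal",    # 土生金
--     "metal": "water",    # 金生水
--     "water": "wood",     # 水生木
-- }
--
-- def get_cycle_sequence(start: str, steps: int = 5) -> List[str]:
--     """
--     Get the enhance cycle sequence starting from an element.
--
--     Args:
--         start: Starting element
--         steps: Number of steps (default: 5 for full cycle)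
--
--     Returns:
--         List of elements in sequence
--     """
--     sequence = [start]
--     current = start
--
--     for _ in range(steps - 1):
--         next_element = ENERGY_ENHANCE.get(current)
--         if next_element is None:
--             break
--         sequence.append(next_element)
--         current = next_element
--
--     return sequence
-- ===== SOURCE B (Python) =====
-- CYCLE = ["wood", "fire", "earth", "metal", "water"]
--
-- def get_cycle_sequence(start: str, steps: int = 5):
--     if start not in CYCLE:
--         return [start]
--     i = CYCLE.index(start)
--     return [CYCLE[(i + k) % 5] for k in range(max(steps, 1))]
-- ===== Notes on version B (the rewrite author's own statement) =====
-- stated objective: simpler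
-- what changed: B replaces the step-by-step dict-following loop with modular index arithmetic over the fixed 5-element cycle list: index the start once and read off CYCLE[(i+k)%5] for k in range(max(steps,1)).
import Mathlib
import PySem

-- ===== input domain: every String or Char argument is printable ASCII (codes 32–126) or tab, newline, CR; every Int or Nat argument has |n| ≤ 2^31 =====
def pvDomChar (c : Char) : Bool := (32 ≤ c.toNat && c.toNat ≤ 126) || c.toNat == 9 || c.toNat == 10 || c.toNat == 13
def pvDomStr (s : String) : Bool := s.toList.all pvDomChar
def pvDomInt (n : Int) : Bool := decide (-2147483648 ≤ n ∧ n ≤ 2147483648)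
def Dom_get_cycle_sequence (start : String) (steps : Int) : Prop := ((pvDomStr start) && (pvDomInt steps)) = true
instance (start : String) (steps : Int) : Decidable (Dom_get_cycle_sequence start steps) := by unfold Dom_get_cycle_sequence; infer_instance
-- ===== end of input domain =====

-- B replaces A's step-by-step dict-following loop with modular index arithmetic over the fixed cycle list (objective: simpler).

-- ===== PORT A =====
def ENERGY_ENHANCE : PySem.Dict String String :=
  PySem.Dict.ofList [("wood", "fire"), ("fire", "earth"), ("earth", "metal"), ("metal", "water"), ("water", "wood")]

-- the 'for _ in range(steps - 1)' loop with its early 'break'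
def pvLoopA : Nat → List String → String → List String
  | 0, seq, _ => seq
  | n + 1, seq, current =>
    match ENERGY_ENHANCE.get? current with
    | none => seq
    | some next_element => pvLoopA n (seq ++ [next_element]) next_element

def get_cycle_sequence (start : String) (steps : Int) : List String :=
  pvLoopA (steps - 1).toNat [start] start

-- ===== PORT B =====
def CYCLE : List String := ["wood", "fire", "earth", "metal", "water"]

def get_cycle_sequence_alt (start : String) (steps : Int) : List String :=
  match PySem.List.index? CYCLE start with      -- 'start not in CYCLE' / 'CYCLE.index(start)'
  | none => [start]
  | some i => (PySem.List.pyRange 0 (max steps 1) 1).map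
      (fun k => PySem.List.pyGetD CYCLE (PySem.Int.mod ((i : Int) + k) 5) "")

-- ===== PRECONDITION & SPEC =====
def Spec_get_cycle_sequence (start : String) (steps : Int) (out : List String) : Prop := out = get_cycle_sequence_alt start steps
instance (start : String) (steps : Int) (out : List String) : Decidable (Spec_get_cycle_sequence start steps out) := by unfold Spec_get_cycle_sequence; infer_instance

-- ===== CLAIM (what is proved, stated in full; the proofs are below) =====
def Claim_equal_get_cycle_sequence : Prop := ∀ (start : String) (steps : Int), Dom_get_cycle_sequence start steps → Spec_get_cycle_sequence start steps (get_cycle_sequence start steps)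

-- ===== LEMMAS AND PROOFS =====

-- if the current element is not a dict key, the loop stops immediately
lemma pvLoopA_stuck (n : Nat) (seq : List String) (cur : String)
    (h : ENERGY_ENHANCE.get? cur = none) : pvLoopA n seq cur = seq := by
  cases n with
  | zero => rfl
  | succ m => simp [pvLoopA, h]

lemma get?_notin (cur : String) (h : cur ∉ CYCLE) : ENERGY_ENHANCE.get? cur = none := by
  simp [CYCLE] at h
  obtain ⟨h1, h2, h3, h4, h5⟩ := h
  rw [show ENERGY_ENHANCE = PySem.Dict.mk [("wood", "fire"), ("fire", "earth"),
    ("earth", "metal"), ("metal", "water"), ("water", "wood")] from rfl]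
  simp [PySem.Dict.get?, Ne.symm h1, Ne.symm h2, Ne.symm h3, Ne.symm h4, Ne.symm h5]

lemma enhance_getD (i : Nat) (hi : i < 5) :
    ENERGY_ENHANCE.get? (CYCLE.getD i "") = some (CYCLE.getD ((i + 1) % 5) "") := by
  interval_cases i <;> decide

-- closed form of A's loop when the current element sits at index i of the cycle
lemma pvLoopA_closed (n : Nat) : ∀ (i : Nat), i < 5 → ∀ (seq : List String),
    pvLoopA n seq (CYCLE.getD i "") =
      seq ++ (List.range n).map (fun k => CYCLE.getD ((i + 1 + k) % 5) "") := by
  induction n with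
  | zero => intro i hi seq; simp [pvLoopA]
  | succ m ih =>
    intro i hi seq
    simp only [pvLoopA, enhance_getD i hi]
    rw [ih ((i + 1) % 5) (Nat.mod_lt _ (by omega)) (seq ++ [CYCLE.getD ((i + 1) % 5) ""])]
    have hmap : (List.range m).map (fun k => CYCLE.getD (((i + 1) % 5 + 1 + k) % 5) "") =
        (List.range m).map (fun k => CYCLE.getD ((i + 1 + (k + 1)) % 5) "") := by
      apply List.map_congr_left
      intro k _
      congr 1
      omega
    rw [hmap, List.append_assoc, List.range_succ_eq_map]
    simp [Function.comp_def]

lemma pyGetD_mod (i k : Nat) :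
    PySem.List.pyGetD CYCLE (PySem.Int.mod ((i : Int) + (k : Nat)) 5) "" =
      CYCLE.getD ((i + k) % 5) "" := by
  rw [PySem.Int.mod_eq_emod_of_pos (by omega : (0:Int) < 5)]
  have h : ((i : Int) + (k : Int)) % 5 = (((i + k) % 5 : Nat) : Int) := by push_cast; omega
  rw [h, PySem.List.pyGetD_natCast]

lemma pvLoopA_main (start : String) (steps : Int) (i : Nat)
    (hidx : PySem.List.index? CYCLE start = some i) :
    get_cycle_sequence start steps = get_cycle_sequence_alt start steps := by
  obtain ⟨hi, hget, -⟩ := PySem.List.getElem_of_index?_eq_some hidx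
  have hi5 : i < 5 := by simpa [CYCLE] using hi
  have hstart : start = CYCLE.getD i "" := by
    rw [List.getD_eq_getElem _ _ hi, hget]
  set n : Nat := (steps - 1).toNat with hn
  have hmax : max steps 1 = ((n + 1 : Nat) : Int) := by omega
  have hA : get_cycle_sequence start steps =
      [CYCLE.getD i ""] ++ (List.range n).map (fun k => CYCLE.getD ((i + 1 + k) % 5) "") := by
    unfold get_cycle_sequence
    rw [hstart, ← hn]
    exact pvLoopA_closed n i hi5 _
  have hB : get_cycle_sequence_alt start steps = (PySem.List.pyRange 0 (max steps 1) 1).map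
      (fun k => PySem.List.pyGetD CYCLE (PySem.Int.mod ((i : Int) + k) 5) "") := by
    unfold get_cycle_sequence_alt
    rw [hidx]
  rw [hA, hB, hmax, PySem.List.pyRange_zero_natCast, List.map_map]
  have hpt : ∀ k ∈ List.range (n + 1),
      ((fun k => PySem.List.pyGetD CYCLE (PySem.Int.mod ((i : Int) + k) 5) "") ∘
        (fun k : Nat => (k : Int))) k = CYCLE.getD ((i + k) % 5) "" := by
    intro k _
    exact pyGetD_mod i k
  rw [List.map_congr_left hpt, List.range_succ_eq_map, List.map_cons, List.map_map]
  have h0 : (i + 0) % 5 = i := by omega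
  have h1 : ∀ k : Nat, ((i + (k + 1)) % 5) = ((i + 1 + k) % 5) := by intro k; omega
  simp only [Function.comp_def, h0, h1]
  rfl
-- ===== VERDICT (by name: the statement is the Claim_ definition above) =====
theorem get_cycle_sequence_spec : Claim_equal_get_cycle_sequence := by
  intro start steps _
  unfold Spec_get_cycle_sequence
  cases hidx : PySem.List.index? CYCLE start with
  | none =>
    have hnot : start ∉ CYCLE := (PySem.List.index?_eq_none_iff _ _).mp hidx
    unfold get_cycle_sequence get_cycle_sequence_alt
    rw [hidx, pvLoopA_stuck _ _ _ (get?_notin start hnot)]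
  | some i => exact pvLoopA_main start steps i hidx
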